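-- pv_equiv track=rewrite | github.com/xavierpuigf/online_watch_and_help | utils/utils_models_wb_backup.py | get_difference_pred
-- ===== SOURCE A (Python) =====
-- def get_difference_pred(pred1_dict, pred2_dict):
--     # Compute pred1 - pred2
--     pred_diff = {}
--     pred_names = list(set(list(pred1_dict.keys()) + list(pred2_dict.keys())))
--     for pred_name in pred_names:
--         if pred_name in pred1_dict:
--             if pred_name in pred2_dict:
--                 pred_diff[pred_name] = {'count': pred1_dict[pred_name]['count'] - pred2_dict[pred_name]['count']}
--             else:
--                 pred_diff[pred_name] = {'count': pred1_dict[pred_name]['count']}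
--         else:
--             pred_diff[pred_name] = {'count': -pred2_dict[pred_name]['count']}
--     pred_diff = {x: y for x,y in pred_diff.items() if y['count'] != 0}
--     return pred_diff
-- ===== SOURCE B (Python) =====
-- def get_difference_pred(pred1_dict, pred2_dict):
--     # Two directional accumulation passes over an int counter, then wrap/filter.
--     counts = {k: v['count'] for k, v in pred1_dict.items()}
--     for k, v in pred2_dict.items():
--         counts[k] = counts.get(k, 0) - v['count']
--     return {k: {'count': c} for k, c in counts.items() if c != 0}
-- ===== Notes on version B (the rewrite author's own statement) =====
-- stated objective: simpler
-- what changed: Replaces the union-of-keys set plus three-way membership branching by two directional accumulation passes over a plain int counter (copy pred1 counts, subtract pred2 counts with get-default-0), then one wrap/filter comprehension.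
import Mathlib
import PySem

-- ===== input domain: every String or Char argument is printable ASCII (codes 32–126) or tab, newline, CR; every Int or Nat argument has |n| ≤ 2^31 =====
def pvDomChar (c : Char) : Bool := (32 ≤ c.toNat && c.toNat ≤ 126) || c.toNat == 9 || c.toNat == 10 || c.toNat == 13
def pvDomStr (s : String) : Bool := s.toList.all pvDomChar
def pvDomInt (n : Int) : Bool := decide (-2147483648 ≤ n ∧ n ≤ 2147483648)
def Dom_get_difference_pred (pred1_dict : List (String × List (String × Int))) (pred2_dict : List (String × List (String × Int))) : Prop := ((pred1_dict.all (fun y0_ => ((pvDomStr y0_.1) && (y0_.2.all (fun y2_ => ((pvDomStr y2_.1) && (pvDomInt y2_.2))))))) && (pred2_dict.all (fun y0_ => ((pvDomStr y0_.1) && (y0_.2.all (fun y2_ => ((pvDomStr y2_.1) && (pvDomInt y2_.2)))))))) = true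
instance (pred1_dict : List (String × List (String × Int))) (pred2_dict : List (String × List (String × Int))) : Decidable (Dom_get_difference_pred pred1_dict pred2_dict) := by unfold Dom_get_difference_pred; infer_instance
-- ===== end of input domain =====

-- B replaces A's union-of-keys set with three-way membership branching by two accumulation
-- passes over an int counter plus one wrap/filter pass (objective: simpler; same asymptotic cost).

-- ===== PORT A =====
-- v['count'] : exact under Pre_ (every value dict contains the key "count"; outside Pre_ Python raises KeyError)
def pvCnt (v : List (String × Int)) : Int := (PySem.Dict.ofList v).getD "count" 0

def get_difference_pred (pred1_dict : List (String × List (String × Int))) (pred2_dict : List (String × List (String × Int))) : List (String × List (String × Int)) :=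
  let p1 : PySem.Dict String (List (String × Int)) := PySem.Dict.ofList pred1_dict
  let p2 : PySem.Dict String (List (String × Int)) := PySem.Dict.ofList pred2_dict
  let pred_names : PySem.Set String := PySem.Set.ofList (p1.keys ++ p2.keys)
  let pred_diff : PySem.Dict String (List (String × Int)) :=
    pred_names.foldl (fun d pred_name =>
      if p1.contains pred_name then
        if p2.contains pred_name then
          d.insert pred_name [("count", pvCnt (p1.getD pred_name []) - pvCnt (p2.getD pred_name []))]
        else
          d.insert pred_name [("count", pvCnt (p1.getD pred_name []))]
      else
        d.insert pred_name [("count", - pvCnt (p2.getD pred_name []))]) PySem.Dict.empty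
  pred_diff.items.filter (fun p => pvCnt p.2 != 0)

-- ===== PORT B =====
def get_difference_pred_alt (pred1_dict : List (String × List (String × Int))) (pred2_dict : List (String × List (String × Int))) : List (String × List (String × Int)) :=
  let counts : PySem.Dict String Int :=
    (PySem.Dict.ofList pred1_dict).items.foldl
      (fun d p => d.insert p.1 (pvCnt p.2)) PySem.Dict.empty
  let counts : PySem.Dict String Int :=
    (PySem.Dict.ofList pred2_dict).items.foldl
      (fun d p => d.insert p.1 (d.getD p.1 0 - pvCnt p.2)) counts
  (counts.items.filter (fun p => p.2 != 0)).map (fun p => (p.1, [("count", p.2)]))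

-- ===== PRECONDITION & SPEC =====
-- Pre_ excludes exactly the inputs on which A raises KeyError: some effective (last-wins) value
-- dict of pred1_dict or pred2_dict lacks the key "count".
def Pre_get_difference_pred (pred1_dict : List (String × List (String × Int))) (pred2_dict : List (String × List (String × Int))) : Prop :=
  ((PySem.Dict.ofList pred1_dict).items.all (fun p => (PySem.Dict.ofList p.2).contains "count")
   && (PySem.Dict.ofList pred2_dict).items.all (fun p => (PySem.Dict.ofList p.2).contains "count")) = true
instance (pred1_dict : List (String × List (String × Int))) (pred2_dict : List (String × List (String × Int))) : Decidable (Pre_get_difference_pred pred1_dict pred2_dict) := by unfold Pre_get_difference_pred; infer_instance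

def pvWitness_get_difference_pred : (List (String × List (String × Int))) × (List (String × List (String × Int))) :=
  ([("a", [("count", 2)])], [("a", [("count", 1)]), ("b", [("count", 3)])])

def Spec_get_difference_pred (pred1_dict : List (String × List (String × Int))) (pred2_dict : List (String × List (String × Int))) (out : List (String × List (String × Int))) : Prop := out = get_difference_pred_alt pred1_dict pred2_dict
instance (pred1_dict : List (String × List (String × Int))) (pred2_dict : List (String × List (String × Int))) (out : List (String × List (String × Int))) : Decidable (Spec_get_difference_pred pred1_dict pred2_dict out) := by unfold Spec_get_difference_pred; infer_instance

-- ===== CLAIM (what is proved, stated in full; the proofs are below) =====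
def Claim_equal_get_difference_pred : Prop := ∀ (pred1_dict : List (String × List (String × Int))) (pred2_dict : List (String × List (String × Int))), Dom_get_difference_pred pred1_dict pred2_dict → Pre_get_difference_pred pred1_dict pred2_dict → Spec_get_difference_pred pred1_dict pred2_dict (get_difference_pred pred1_dict pred2_dict)

-- ===== LEMMAS AND PROOFS =====

def pvG (pred1_dict pred2_dict : List (String × List (String × Int))) (k : String) : Int :=
  let p1 := PySem.Dict.ofList pred1_dict
  let p2 := PySem.Dict.ofList pred2_dict
  if p1.contains k then
    if p2.contains k then pvCnt (p1.getD k []) - pvCnt (p2.getD k []) else pvCnt (p1.getD k [])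
  else - pvCnt (p2.getD k [])


lemma find?_key_nodup {ν : Type} (l : List (String × ν)) (k : String) (v : ν)
    (hnd : (l.map Prod.fst).Nodup) (hm : (k, v) ∈ l) :
    l.find? (fun q => q.1 == k) = some (k, v) := by
  induction l with
  | nil => simp at hm
  | cons a t ih =>
    simp only [List.map_cons, List.nodup_cons] at hnd
    rcases List.mem_cons.mp hm with h | h
    · subst h; simp
    · have hne : a.1 ≠ k := by
        intro he
        exact hnd.1 (he ▸ (List.mem_map.mpr ⟨(k, v), h, rfl⟩))
      rw [List.find?_cons_of_neg (by simpa using hne)]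
      exact ih hnd.2 h

lemma find?_key_none {ν : Type} (l : List (String × ν)) (k : String)
    (h : ∀ q ∈ l, q.1 ≠ k) :
    l.find? (fun q => q.1 == k) = none := by
  apply List.find?_eq_none.mpr
  intro q hq
  simpa using h q hq

lemma foldl_set_add (b : List String) : ∀ (s : List String), b.Nodup →
    b.foldl PySem.Set.add s = s ++ b.filter (fun x => !(s.contains x)) := by
  induction b with
  | nil => intro s _; simp
  | cons x t ih =>
    intro s hnd
    simp only [List.nodup_cons] at hnd
    simp only [List.foldl_cons, List.filter_cons]
    by_cases hc : x ∈ s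
    · have hb : s.contains x = true := by simpa using hc
      have ha : PySem.Set.add s x = s := by
        simp only [PySem.Set.add, PySem.Set.contains, hb]
        simp
      rw [ha, ih s hnd.2]
      simp only [hb]
      simp
    · have hb : s.contains x = false := by simpa using hc
      have ha : PySem.Set.add s x = s ++ [x] := by
        simp only [PySem.Set.add, PySem.Set.contains, hb]
        simp
      rw [ha, ih _ hnd.2]
      have he : t.filter (fun y => !((s ++ [x]).contains y)) = t.filter (fun y => !(s.contains y)) := by
        apply List.filter_congr
        intro y hy
        have hne : y ≠ x := fun h2 => hnd.1 (h2 ▸ hy)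
        simp [hne]
      rw [he]
      simp only [hb]
      simp

lemma foldl_step2_items (l : List (String × List (String × Int))) :
    ∀ (d : PySem.Dict String Int), d.keys.Nodup → (l.map Prod.fst).Nodup →
    (l.foldl (fun d p => d.insert p.1 (d.getD p.1 0 - pvCnt p.2)) d).items =
      d.items.map (fun q => match l.find? (fun p => p.1 == q.1) with
          | some p => (q.1, q.2 - pvCnt p.2)
          | none => q)
      ++ (l.filter (fun p => !(d.contains p.1))).map (fun p => (p.1, 0 - pvCnt p.2)) := by
  induction l with
  | nil =>
    intro d _ _
    simp
  | cons p t ih =>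
    intro d hd hl
    simp only [List.map_cons, List.nodup_cons] at hl
    simp only [List.foldl_cons, List.filter_cons]
    set w : Int := d.getD p.1 0 - pvCnt p.2 with hw
    have hd' : (d.insert p.1 w).keys.Nodup := PySem.Dict.nodup_keys_insert d _ _ hd
    rw [ih _ hd' hl.2]
    have hcont : ∀ q : String × List (String × Int), q.1 ≠ p.1 →
        (d.insert p.1 w).contains q.1 = d.contains q.1 := by
      intro q hne
      rw [PySem.Dict.contains_insert]
      simp [hne]
    have hfilt : t.filter (fun q => !((d.insert p.1 w).contains q.1))
        = t.filter (fun q => !(d.contains q.1)) := by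
      apply List.filter_congr
      intro q hq
      have : q.1 ≠ p.1 := by
        intro he
        exact hl.1 (he ▸ List.mem_map.mpr ⟨q, hq, rfl⟩)
      rw [hcont q this]
    rw [hfilt]
    by_cases hc : d.contains p.1
    · -- key present: insert rewrites in place, the fresh-key filter drops p
      rw [PySem.Dict.items_insert_of_contains _ _ hc]
      rw [List.map_map]
      have h1 : (d.items.map ((fun q => match t.find? (fun r => r.1 == q.1) with
              | some r => (q.1, q.2 - pvCnt r.2)
              | none => q) ∘ (fun q => if (q.1 == p.1) = true then (p.1, w) else q)))
          = d.items.map (fun q => match (p :: t).find? (fun r => r.1 == q.1) with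
              | some r => (q.1, q.2 - pvCnt r.2)
              | none => q) := by
        apply List.map_congr_left
        intro q hq
        by_cases he : q.1 = p.1
        · -- q is the entry at key p.1; its stored value is d.getD p.1 0
          have hv : d.getD p.1 0 = q.2 := by
            have : (p.1, q.2) ∈ d.items := by
              have := hq
              rw [← he]
              simpa using hq
            exact PySem.Dict.getD_of_mem_items d this hd 0
          have hfind : t.find? (fun r => r.1 == p.1) = none := by
            apply find?_key_none
            intro r hr hre
            exact hl.1 (hre ▸ List.mem_map.mpr ⟨r, hr, rfl⟩)
          simp only [Function.comp, he]
          simp only [beq_self_eq_true, if_pos]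
          rw [List.find?_cons_of_pos (by simp), hfind]
          simp [hw, hv]
        · have hne : (p.1 == q.1) = false := by
            simp only [beq_eq_false_iff_ne]
            exact fun h2 => he h2.symm
          have hne' : (q.1 == p.1) = false := by
            simp only [beq_eq_false_iff_ne]
            exact he
          simp only [Function.comp, hne', Bool.false_eq_true, if_false]
          simp only [List.find?_cons, hne]
      rw [h1]
      have : (if (!(d.contains p.1)) = true then
            (p.1, 0 - pvCnt p.2) :: (t.filter (fun q => !(d.contains q.1))).map (fun r => (r.1, 0 - pvCnt r.2))
          else (t.filter (fun q => !(d.contains q.1))).map (fun r => (r.1, 0 - pvCnt r.2))) =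
          (t.filter (fun q => !(d.contains q.1))).map (fun r => (r.1, 0 - pvCnt r.2)) := by
        simp [hc]
      simp only [hc]
      simp
    · -- fresh key: insert appends, the filter keeps p
      have hcf : d.contains p.1 = false := eq_false_of_ne_true hc
      rw [PySem.Dict.items_insert_of_not_contains _ _ hcf]
      rw [List.map_append]
      have hgd : d.getD p.1 0 = 0 := PySem.Dict.getD_of_not_contains d 0 hcf
      have h1 : d.items.map (fun q => match t.find? (fun r => r.1 == q.1) with
              | some r => (q.1, q.2 - pvCnt r.2)
              | none => q)
          = d.items.map (fun q => match (p :: t).find? (fun r => r.1 == q.1) with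
              | some r => (q.1, q.2 - pvCnt r.2)
              | none => q) := by
        apply List.map_congr_left
        intro q hq
        have hne : ¬ ((p.1 == q.1) = true) := by
          simp only [beq_iff_eq]
          intro he
          have : q.1 ∈ d.keys := PySem.Dict.mem_keys_of_mem_items d hq
          rw [← he] at this
          rw [PySem.Dict.contains_eq_decide_mem_keys] at hc
          simp [this] at hc
        have hne2 : (p.1 == q.1) = false := by
          simpa using fun h2 => hne (by simp [h2])
        simp only [List.find?_cons, hne2]
      have h2 : [(p.1, w)].map (fun q => match t.find? (fun r => r.1 == q.1) with
              | some r => (q.1, q.2 - pvCnt r.2)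
              | none => q) = [(p.1, 0 - pvCnt p.2)] := by
        have hfind : t.find? (fun r => r.1 == p.1) = none := by
          apply find?_key_none
          intro r hr hre
          exact hl.1 (hre ▸ List.mem_map.mpr ⟨r, hr, rfl⟩)
        simp [hfind, hw, hgd]
      rw [h1, h2]
      simp only [hc]
      simp

lemma contains_eq_decide_mem (l : List String) (x : String) : l.contains x = decide (x ∈ l) := by
  simp

lemma pvCnt_single (c : Int) : pvCnt [("count", c)] = c := by
  simp [pvCnt, PySem.Dict.ofList, PySem.Dict.update, PySem.Dict.getD_insert_self]

lemma A_norm (l1 l2 : List (String × List (String × Int))) :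
    get_difference_pred l1 l2 =
      ((PySem.Set.ofList ((PySem.Dict.ofList l1).keys ++ (PySem.Dict.ofList (ν := List (String × Int)) l2).keys)).filter
        (fun k => pvG l1 l2 k != 0)).map (fun k => (k, [("count", pvG l1 l2 k)])) := by
  unfold get_difference_pred
  simp only []
  set p1 := PySem.Dict.ofList (ν := List (String × Int)) l1
  set p2 := PySem.Dict.ofList (ν := List (String × Int)) l2
  set names := PySem.Set.ofList (p1.keys ++ p2.keys) with hnames
  have hbody : (fun (d : PySem.Dict String (List (String × Int))) pred_name =>
      if p1.contains pred_name then
        if p2.contains pred_name then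
          d.insert pred_name [("count", pvCnt (p1.getD pred_name []) - pvCnt (p2.getD pred_name []))]
        else
          d.insert pred_name [("count", pvCnt (p1.getD pred_name []))]
      else
        d.insert pred_name [("count", - pvCnt (p2.getD pred_name []))])
      = fun d k => d.insert k [("count", pvG l1 l2 k)] := by
    funext d k
    simp only [pvG]
    split_ifs <;> rfl
  rw [hbody]
  have hnd : (names.map id).Nodup := by
    rw [List.map_id, hnames]
    exact PySem.Set.nodup_ofList (p1.keys ++ p2.keys)
  have hfresh : ∀ a ∈ names, (PySem.Dict.empty (κ := String) (ν := List (String × Int))).contains a = false := by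
    intro a _
    simp
  have hitems := PySem.Dict.items_foldl_insert_fresh names id (fun k => [("count", pvG l1 l2 k)]) PySem.Dict.empty hfresh hnd
  simp only [id] at hitems
  rw [hitems]
  rw [show (PySem.Dict.empty (κ := String) (ν := List (String × Int))).items = [] from rfl, List.nil_append]
  rw [List.filter_map]
  have : ((fun (p : String × List (String × Int)) => pvCnt p.2 != 0) ∘ (fun a => (a, [("count", pvG l1 l2 a)])))
      = fun k => pvG l1 l2 k != 0 := by
    funext k
    simp [Function.comp, pvCnt_single]
  rw [this]

lemma B_norm (l1 l2 : List (String × List (String × Int))) :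
    get_difference_pred_alt l1 l2 =
      ((PySem.Set.ofList ((PySem.Dict.ofList l1).keys ++ (PySem.Dict.ofList (ν := List (String × Int)) l2).keys)).filter
        (fun k => pvG l1 l2 k != 0)).map (fun k => (k, [("count", pvG l1 l2 k)])) := by
  unfold get_difference_pred_alt
  simp only []
  set p1 := PySem.Dict.ofList (ν := List (String × Int)) l1 with hp1
  set p2 := PySem.Dict.ofList (ν := List (String × Int)) l2 with hp2
  -- keys are items.map fst, and they are nodup
  have hk1 : p1.keys = p1.items.map Prod.fst := by simp only [PySem.Dict.keys]
  have hk2 : p2.keys = p2.items.map Prod.fst := by simp only [PySem.Dict.keys]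
  have hnd1 : (p1.items.map Prod.fst).Nodup := by rw [← hk1]; exact PySem.Dict.nodup_keys_ofList l1
  have hnd2 : (p2.items.map Prod.fst).Nodup := by rw [← hk2]; exact PySem.Dict.nodup_keys_ofList l2
  -- the first pass
  have hfresh : ∀ a ∈ p1.items, (PySem.Dict.empty (κ := String) (ν := Int)).contains a.1 = false := by
    intro a _; simp
  have h1 := PySem.Dict.items_foldl_insert_fresh p1.items Prod.fst (fun p => pvCnt p.2) PySem.Dict.empty hfresh hnd1
  rw [show (PySem.Dict.empty (κ := String) (ν := Int)).items = [] from rfl, List.nil_append] at h1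
  set c1 : PySem.Dict String Int := p1.items.foldl (fun d p => d.insert p.1 (pvCnt p.2)) PySem.Dict.empty with hc1
  have hc1items : c1.items = p1.items.map (fun p => (p.1, pvCnt p.2)) := h1
  have hc1keys : c1.keys = p1.keys := by
    simp only [PySem.Dict.keys, hc1items, List.map_map]
    rfl
  have hc1nd : c1.keys.Nodup := by rw [hc1keys, hk1]; exact hnd1
  have hc1cont : ∀ x, c1.contains x = p1.contains x := by
    intro x
    rw [PySem.Dict.contains_eq_decide_mem_keys, PySem.Dict.contains_eq_decide_mem_keys, hc1keys]
  -- the second pass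
  rw [foldl_step2_items p2.items c1 hc1nd hnd2]
  -- part 1: entries of pred1, possibly decremented
  have hpart1 : c1.items.map (fun q => match p2.items.find? (fun p => p.1 == q.1) with
          | some p => (q.1, q.2 - pvCnt p.2)
          | none => q)
      = p1.items.map (fun p => (p.1, pvG l1 l2 p.1)) := by
    rw [hc1items, List.map_map]
    apply List.map_congr_left
    intro q hq
    have hmem1 : p1.contains q.1 = true := by
      rw [PySem.Dict.contains_eq_decide_mem_keys]
      simpa using PySem.Dict.mem_keys_of_mem_items p1 hq
    have hgd1 : p1.getD q.1 [] = q.2 := PySem.Dict.getD_of_mem_items p1 hq (by rw [hk1]; exact hnd1) []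
    simp only [Function.comp]
    by_cases hc2 : p2.contains q.1 = true
    · -- q.1 also in pred2: find? hits its unique entry
      rw [PySem.Dict.contains_eq_decide_mem_keys] at hc2
      rw [hk2] at hc2
      simp only [decide_eq_true_eq, List.mem_map] at hc2
      obtain ⟨r, hr, hre⟩ := hc2
      have hrm : (q.1, r.2) ∈ p2.items := by rw [← hre]; exact hr
      rw [find?_key_nodup p2.items q.1 r.2 hnd2 hrm]
      have hgd2 : p2.getD q.1 [] = r.2 := PySem.Dict.getD_of_mem_items p2 hrm (by rw [hk2]; exact hnd2) []
      have hc2' : p2.contains q.1 = true := by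
        rw [PySem.Dict.contains_eq_decide_mem_keys]
        simpa using PySem.Dict.mem_keys_of_mem_items p2 hrm
      simp only [pvG, ← hp1, ← hp2, hmem1, hc2', if_true, hgd1, hgd2]
    · have hfn : p2.items.find? (fun p => p.1 == q.1) = none := by
        apply find?_key_none
        intro r hr hre
        apply hc2
        rw [PySem.Dict.contains_eq_decide_mem_keys]
        simpa using hre ▸ PySem.Dict.mem_keys_of_mem_items p2 hr
      rw [hfn]
      have hc2' : p2.contains q.1 = false := eq_false_of_ne_true hc2
      simp only [pvG, ← hp1, ← hp2, hmem1, hc2', if_true, Bool.false_eq_true, if_false, hgd1]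
  -- part 2: fresh entries of pred2
  have hpart2 : (p2.items.filter (fun p => !(c1.contains p.1))).map (fun p => (p.1, 0 - pvCnt p.2))
      = (p2.items.filter (fun p => !(p1.contains p.1))).map (fun p => (p.1, pvG l1 l2 p.1)) := by
    have hf : p2.items.filter (fun p => !(c1.contains p.1)) = p2.items.filter (fun p => !(p1.contains p.1)) := by
      apply List.filter_congr
      intro q _
      rw [hc1cont]
    rw [hf]
    apply List.map_congr_left
    intro q hq
    have hq2 : q ∈ p2.items := List.mem_of_mem_filter hq
    have hnc1 : p1.contains q.1 = false := by
      have := List.of_mem_filter hq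
      simpa using this
    have hgd2 : p2.getD q.1 [] = q.2 := PySem.Dict.getD_of_mem_items p2 hq2 (by rw [hk2]; exact hnd2) []
    simp only [pvG, ← hp1, ← hp2, hnc1, Bool.false_eq_true, if_false, hgd2]
    simp
  rw [hpart1, hpart2]
  -- the union-of-keys set splits into pred1's keys and pred2's fresh keys
  have hnames : PySem.Set.ofList (p1.keys ++ p2.keys)
      = p1.keys ++ p2.keys.filter (fun x => !(p1.keys.contains x)) := by
    rw [PySem.Set.ofList_eq_foldl, List.foldl_append]
    have h01 : List.foldl PySem.Set.add [] p1.keys = p1.keys := by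
      rw [foldl_set_add p1.keys [] (by rw [hk1]; exact hnd1)]
      simp
    rw [h01, foldl_set_add p2.keys p1.keys (by rw [hk2]; exact hnd2)]
  have key : ∀ ks : List String,
      ((ks.map (fun k => (k, pvG l1 l2 k))).filter (fun p => p.2 != 0)).map (fun p => (p.1, [("count", p.2)]))
      = (ks.filter (fun k => pvG l1 l2 k != 0)).map (fun k => (k, [("count", pvG l1 l2 k)])) := by
    intro ks
    rw [List.filter_map, List.map_map]
    rfl
  have hm1 : p1.items.map (fun p => (p.1, pvG l1 l2 p.1)) = p1.keys.map (fun k => (k, pvG l1 l2 k)) := by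
    rw [hk1, List.map_map]
    rfl
  have hm2 : (p2.items.filter (fun p => !(p1.contains p.1))).map (fun p => (p.1, pvG l1 l2 p.1))
      = (p2.keys.filter (fun x => !(p1.keys.contains x))).map (fun k => (k, pvG l1 l2 k)) := by
    rw [hk2, List.filter_map, List.map_map]
    have : ((fun x => !(p1.keys.contains x)) ∘ (Prod.fst (β := List (String × Int)))) = (fun p => !(p1.contains p.1)) := by
      funext q
      simp only [Function.comp]
      rw [contains_eq_decide_mem, PySem.Dict.contains_eq_decide_mem_keys]
    rw [this]
    rfl
  rw [hm1, hm2, hnames, List.filter_append, List.map_append, List.filter_append, List.map_append,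
    key p1.keys, key (p2.keys.filter (fun x => !(p1.keys.contains x)))]

-- ===== VERDICT (by name: the statement is the Claim_ definition above) =====
theorem get_difference_pred_spec : Claim_equal_get_difference_pred := by
  intro pred1_dict pred2_dict _ _
  unfold Spec_get_difference_pred
  rw [A_norm, B_norm]
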